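-- pv_equiv track=rewrite | github.com/harshini0930/Codon-to-Protein-Translator | codon_to_protein.py | amino_acid_properties
-- ===== SOURCE A (Python) =====
-- def amino_acid_properties(protein_seq):
--     aa_properties = {
--         'A':'hydrophobic','R':'basic','N':'polar','D':'acidic','C':'polar',
--         'E':'acidic','Q':'polar','G':'hydrophobic','H':'basic','I':'hydrophobic',
--         'L':'hydrophobic','K':'basic','M':'hydrophobic','F':'hydrophobic',
--         'P':'hydrophobic','S':'polar','T':'polar','W':'hydrophobic','Y':'polar','V':'hydrophobic'
--     }
--     return {aa: aa_properties.get(aa,'unknown') for aa in protein_seq}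
-- ===== SOURCE B (Python) =====
-- # Inverted table: category -> member residues (as a string), scanned recursively.
-- CATEGORIES = [
--     ("hydrophobic", "AGILMFPWV"),
--     ("basic", "RHK"),
--     ("polar", "NCQSTY"),
--     ("acidic", "DE"),
-- ]
--
--
-- def _lookup(cats, aa):
--     """Recursively scan the category table; 'unknown' when the table is exhausted."""
--     if not cats:
--         return 'unknown'
--     name, members = cats[0]
--     if aa in members:
--         return name
--     return _lookup(cats[1:], aa)
--
--
-- def amino_acid_properties(protein_seq):
--     # Stage 1: distinct residues in order of first occurrence.
--     order = []
--     seen = set()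
--     for aa in protein_seq:
--         if aa not in seen:
--             seen.add(aa)
--             order.append(aa)
--     # Stage 2: classify each distinct residue once via the inverted table.
--     return {aa: _lookup(CATEGORIES, aa) for aa in order}
-- ===== Notes on version B (the rewrite author's own statement) =====
-- stated objective: alternative
-- what changed: Replaces the flat residue-to-property dict comprehension by a two-stage algorithm: an explicit first-occurrence dedup pass over the sequence, then a recursive scan of an inverted category-to-members table ('unknown' when the table is exhausted) applied once per distinct residue.
import Mathlib
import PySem

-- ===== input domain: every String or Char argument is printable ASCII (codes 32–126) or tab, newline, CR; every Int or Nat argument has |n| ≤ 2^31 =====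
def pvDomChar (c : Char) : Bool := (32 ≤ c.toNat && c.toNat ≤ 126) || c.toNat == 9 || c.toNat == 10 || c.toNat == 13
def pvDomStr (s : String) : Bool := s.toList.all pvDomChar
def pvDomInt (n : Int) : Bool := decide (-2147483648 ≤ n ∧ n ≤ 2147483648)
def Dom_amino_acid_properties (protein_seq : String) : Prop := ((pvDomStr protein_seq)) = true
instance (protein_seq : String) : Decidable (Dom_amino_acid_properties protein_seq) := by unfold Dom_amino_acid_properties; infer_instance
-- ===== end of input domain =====

-- B replaces the flat residue→property dict comprehension by a two-stage algorithm: a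
-- first-occurrence dedup pass, then a recursive scan of an inverted category→members table
-- applied once per distinct residue (alternative decomposition, same behaviour).

-- ===== PORT A =====
-- the aa_properties dict literal
def aaProps : PySem.Dict String String := PySem.Dict.ofList
  [("A","hydrophobic"),("R","basic"),("N","polar"),("D","acidic"),("C","polar"),
   ("E","acidic"),("Q","polar"),("G","hydrophobic"),("H","basic"),("I","hydrophobic"),
   ("L","hydrophobic"),("K","basic"),("M","hydrophobic"),("F","hydrophobic"),
   ("P","hydrophobic"),("S","polar"),("T","polar"),("W","hydrophobic"),("Y","polar"),("V","hydrophobic")]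

-- {aa: aa_properties.get(aa, 'unknown') for aa in protein_seq}
def amino_acid_properties (protein_seq : String) : List (String × String) :=
  (protein_seq.toList.foldl
    (fun d c => d.insert (String.ofList [c]) (aaProps.getD (String.ofList [c]) "unknown"))
    PySem.Dict.empty).items

-- ===== PORT B =====
-- CATEGORIES: the inverted table, category name → member residues
def bCategories : List (String × String) :=
  [("hydrophobic", "AGILMFPWV"), ("basic", "RHK"), ("polar", "NCQSTY"), ("acidic", "DE")]

-- _lookup(cats, aa): recursive scan of the table, 'unknown' when exhausted
def bLookup : List (String × String) → String → String
  | [], _ => "unknown"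
  | (name, members) :: rest, aa =>
      if PySem.Str.isIn aa members then name else bLookup rest aa

-- stage 1: dedup loop (seen set, order list); stage 2: {aa: _lookup(CATEGORIES, aa) for aa in order}
def amino_acid_properties_alt (protein_seq : String) : List (String × String) :=
  let st := protein_seq.toList.foldl
    (fun (st : PySem.Set String × List String) c =>
      let aa := String.ofList [c]
      if PySem.Set.contains st.1 aa then st else (PySem.Set.add st.1 aa, st.2 ++ [aa]))
    (PySem.Set.empty, [])
  st.2.map (fun aa => (aa, bLookup bCategories aa))

-- ===== PRECONDITION & SPEC =====
def Spec_amino_acid_properties (protein_seq : String) (out : List (String × String)) : Prop := out = amino_acid_properties_alt protein_seq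
instance (protein_seq : String) (out : List (String × String)) : Decidable (Spec_amino_acid_properties protein_seq out) := by unfold Spec_amino_acid_properties; infer_instance

-- ===== CLAIM (what is proved, stated in full; the proofs are below) =====
def Claim_equal_amino_acid_properties : Prop := ∀ (protein_seq : String), Dom_amino_acid_properties protein_seq → Spec_amino_acid_properties protein_seq (amino_acid_properties protein_seq)

-- ===== LEMMAS AND PROOFS =====

theorem ofsi {c a : Char} (h : String.ofList [c] = String.ofList [a]) : c = a := by
  have := congrArg String.toList h; simpa using this

theorem single_not_isIn {c : Char} {l : List Char}
    (h : c ∉ l) : PySem.Chars.isIn [c] l = false := by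
  by_contra hne
  have htrue : PySem.Chars.isIn [c] l = true := by
    cases hx : PySem.Chars.isIn [c] l
    · exact absurd hx hne
    · rfl
  have hinf := (PySem.Chars.isIn_iff_infix _ _).mp htrue
  exact h (hinf.subset (List.mem_singleton_self c))

-- B's recursive inverted-table lookup agrees with A's flat-dict lookup on every 1-char key.
theorem lookup_eq_table (c : Char) :
    bLookup bCategories (String.ofList [c]) = aaProps.getD (String.ofList [c]) "unknown" := by
  by_cases hA : c = 'A'
  · subst hA; decide
  by_cases hR : c = 'R'
  · subst hR; decide
  by_cases hN : c = 'N'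
  · subst hN; decide
  by_cases hD : c = 'D'
  · subst hD; decide
  by_cases hC : c = 'C'
  · subst hC; decide
  by_cases hE : c = 'E'
  · subst hE; decide
  by_cases hQ : c = 'Q'
  · subst hQ; decide
  by_cases hG : c = 'G'
  · subst hG; decide
  by_cases hH : c = 'H'
  · subst hH; decide
  by_cases hI : c = 'I'
  · subst hI; decide
  by_cases hL : c = 'L'
  · subst hL; decide
  by_cases hK : c = 'K'
  · subst hK; decide
  by_cases hM : c = 'M'
  · subst hM; decide
  by_cases hF : c = 'F'
  · subst hF; decide
  by_cases hP : c = 'P'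
  · subst hP; decide
  by_cases hS : c = 'S'
  · subst hS; decide
  by_cases hT : c = 'T'
  · subst hT; decide
  by_cases hW : c = 'W'
  · subst hW; decide
  by_cases hY : c = 'Y'
  · subst hY; decide
  by_cases hV : c = 'V'
  · subst hV; decide
  -- c is none of the 20 residues: both sides give "unknown"
  have h1 : PySem.Chars.isIn [c] ['A', 'G', 'I', 'L', 'M', 'F', 'P', 'W', 'V'] = false := by
    apply single_not_isIn
    intro hm
    simp only [List.mem_cons, List.not_mem_nil, or_false] at hm
    rcases hm with hm|hm|hm|hm|hm|hm|hm|hm|hm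
    · exact hA hm
    · exact hG hm
    · exact hI hm
    · exact hL hm
    · exact hM hm
    · exact hF hm
    · exact hP hm
    · exact hW hm
    · exact hV hm
  have h2 : PySem.Chars.isIn [c] ['R', 'H', 'K'] = false := by
    apply single_not_isIn
    intro hm
    simp only [List.mem_cons, List.not_mem_nil, or_false] at hm
    rcases hm with hm|hm|hm
    · exact hR hm
    · exact hH hm
    · exact hK hm
  have h3 : PySem.Chars.isIn [c] ['N', 'C', 'Q', 'S', 'T', 'Y'] = false := by
    apply single_not_isIn
    intro hm
    simp only [List.mem_cons, List.not_mem_nil, or_false] at hm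
    rcases hm with hm|hm|hm|hm|hm|hm
    · exact hN hm
    · exact hC hm
    · exact hQ hm
    · exact hS hm
    · exact hT hm
    · exact hY hm
  have h4 : PySem.Chars.isIn [c] ['D', 'E'] = false := by
    apply single_not_isIn
    intro hm
    simp only [List.mem_cons, List.not_mem_nil, or_false] at hm
    rcases hm with hm|hm
    · exact hD hm
    · exact hE hm
  have nmK : String.ofList [c] ∉ (["A", "R", "N", "D", "C", "E", "Q", "G", "H", "I", "L", "K", "M", "F", "P", "S", "T", "W", "Y", "V"] : List String) := by
    intro hm
    simp only [List.mem_cons, List.not_mem_nil, or_false] at hm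
    rcases hm with hm|hm|hm|hm|hm|hm|hm|hm|hm|hm|hm|hm|hm|hm|hm|hm|hm|hm|hm|hm
    · exact hA (ofsi hm)
    · exact hR (ofsi hm)
    · exact hN (ofsi hm)
    · exact hD (ofsi hm)
    · exact hC (ofsi hm)
    · exact hE (ofsi hm)
    · exact hQ (ofsi hm)
    · exact hG (ofsi hm)
    · exact hH (ofsi hm)
    · exact hI (ofsi hm)
    · exact hL (ofsi hm)
    · exact hK (ofsi hm)
    · exact hM (ofsi hm)
    · exact hF (ofsi hm)
    · exact hP (ofsi hm)
    · exact hS (ofsi hm)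
    · exact hT (ofsi hm)
    · exact hW (ofsi hm)
    · exact hY (ofsi hm)
    · exact hV (ofsi hm)
  have hkeys : aaProps.keys = (["A", "R", "N", "D", "C", "E", "Q", "G", "H", "I", "L", "K", "M", "F", "P", "S", "T", "W", "Y", "V"] : List String) := by decide
  have hget : aaProps.get? (String.ofList [c]) = none := by
    rw [PySem.Dict.get?_eq_none_iff_not_mem_keys, hkeys]; exact nmK
  simp [bLookup, bCategories, h1, h2, h3, h4, PySem.Dict.getD, hget]

-- Re-inserting an already-present binding with its existing value is a no-op on the dict.
theorem insert_mem_self {d : PySem.Dict String String} (hnd : d.keys.Nodup)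
    {k v : String} (h : d.get? k = some v) : d.insert k v = d := by
  apply PySem.Dict.ext
  have hc : d.contains k = true := by
    rw [PySem.Dict.contains_eq_isSome_get?, h]; rfl
  rw [PySem.Dict.items_insert_of_contains d v hc]
  have hmap : ∀ p ∈ d.items, (if p.1 == k then (k, v) else p) = p := by
    rintro ⟨pk, pv⟩ hp
    by_cases hk : pk = k
    · subst hk
      have hpv := PySem.Dict.get?_of_mem_items d hp hnd
      rw [h] at hpv
      simp [Option.some.inj hpv]
    · simp [hk]
  calc d.items.map (fun p => if p.1 == k then (k, v) else p)
      = d.items.map id := List.map_congr_left hmap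
    _ = d.items := List.map_id _

-- Loop invariant relating A's overwrite-always dict loop to B's (seen, order) dedup loop:
-- the dict's items are exactly the order list tagged with B's lookup values.
theorem fold_eq (l : List Char) (d : PySem.Dict String String)
    (seen : PySem.Set String) (order : List String)
    (hnd : d.keys.Nodup)
    (hseen : ∀ a, PySem.Set.contains seen a = d.contains a)
    (hlook : ∀ aa ∈ order, bLookup bCategories aa = aaProps.getD aa "unknown")
    (hitems : d.items = order.map (fun aa => (aa, bLookup bCategories aa))) :
    (l.foldl (fun d c => d.insert (String.ofList [c]) (aaProps.getD (String.ofList [c]) "unknown")) d).items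
      = (l.foldl (fun (st : PySem.Set String × List String) c =>
            let aa := String.ofList [c]
            if PySem.Set.contains st.1 aa then st else (PySem.Set.add st.1 aa, st.2 ++ [aa]))
          (seen, order)).2.map (fun aa => (aa, bLookup bCategories aa)) := by
  induction l generalizing d seen order with
  | nil => simpa using hitems
  | cons c rest ih =>
    simp only [List.foldl_cons]
    by_cases hc : d.contains (String.ofList [c]) = true
    · -- residue already present: A re-inserts the same value, B skips
      obtain ⟨v, hv⟩ : ∃ v, d.get? (String.ofList [c]) = some v := by
        rw [PySem.Dict.contains_eq_isSome_get?] at hc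
        exact Option.isSome_iff_exists.mp hc
      have hvmem := PySem.Dict.mem_items_of_get?_eq_some d hv
      rw [hitems, List.mem_map] at hvmem
      obtain ⟨aa, haaorder, haaeq⟩ := hvmem
      have haak : aa = String.ofList [c] := (Prod.mk.injEq _ _ _ _).mp haaeq |>.1
      have hvval : v = aaProps.getD (String.ofList [c]) "unknown" := by
        have := (Prod.mk.injEq _ _ _ _).mp haaeq |>.2
        rw [← this, ← haak]
        exact hlook aa haaorder
      rw [← hvval, insert_mem_self hnd hv, if_pos (by rw [hseen]; exact hc)]
      exact ih d seen order hnd hseen hlook hitems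
    · -- new residue: A appends a binding, B appends to order and seen
      rw [if_neg (by rw [hseen]; exact Bool.not_eq_true _ ▸ hc)]
      apply ih
      · exact PySem.Dict.nodup_keys_insert _ _ _ hnd
      · intro a
        have hadd : PySem.Set.add seen (String.ofList [c]) = seen ++ [String.ofList [c]] := by
          unfold PySem.Set.add
          rw [if_neg (by rw [hseen]; exact Bool.not_eq_true _ ▸ hc)]
        rw [hadd]
        simp only [PySem.Set.contains_eq_listContains, List.contains_append,
          PySem.Dict.contains_insert]
        rw [← PySem.Set.contains_eq_listContains, hseen a]
        cases hd : d.contains a <;> by_cases he : a = String.ofList [c] <;> simp [he]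
      · intro aa haa
        rcases List.mem_append.mp haa with h | h
        · exact hlook aa h
        · rw [List.mem_singleton.mp h, lookup_eq_table]
      · rw [PySem.Dict.items_insert_of_not_contains _ _ (Bool.not_eq_true _ ▸ hc)]
        rw [hitems, List.map_append, List.map_singleton, lookup_eq_table]

-- ===== VERDICT (by name: the statement is the Claim_ definition above) =====
theorem amino_acid_properties_spec : Claim_equal_amino_acid_properties := by
  intro s _
  unfold Spec_amino_acid_properties amino_acid_properties amino_acid_properties_alt
  apply fold_eq
  · exact PySem.Dict.nodup_keys_empty
  · intro a; simp [PySem.Set.empty, PySem.Dict.contains_empty]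
  · intro aa h; simp at h
  · simp [PySem.Dict.empty]
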